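-- pv_equiv track=rewrite | github.com/nikolay-e/treemapper | src/treemapper/diffctx/parsers/base.py | find_balanced_end_line
-- ===== SOURCE A (Python) =====
-- _GENERIC_MAX_EXTENSION = 100
--
-- _BRACKET_PAIRS = {"{": "}", "[": "]", "(": ")"}
--
-- _CLOSE_BRACKETS = set(_BRACKET_PAIRS.values())
--
-- def _process_char_in_string(char: str, string_char: str, escape_count: int) -> tuple[bool, int]:
--     if char == "\\":
--         return True, escape_count + 1
--     if char == string_char and escape_count % 2 == 0:
--         return False, 0
--     return True, 0
--
-- def _process_char_outside_string(char: str, stack: list[str]) -> tuple[bool, str]: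
--     if char in ('"', "'", "`"):
--         return True, char
--     if char in _BRACKET_PAIRS:
--         stack.append(_BRACKET_PAIRS[char])
--     elif char in _CLOSE_BRACKETS and stack and stack[-1] == char:
--         stack.pop()
--     return False, ""
--
-- def compute_bracket_balance(text: str) -> int:
--     stack: list[str] = []
--     in_string = False
--     string_char = ""
--     escape_count = 0
--
--     for char in text:
--         if in_string:
--             in_string, escape_count = _process_char_in_string(char, string_char, escape_count)
--         else:
--             in_string, string_char = _process_char_outside_string(char, stack)
--             escape_count = 0
--
--     return len(stack)
--
-- def _is_comment_or_blank(line: str) -> bool: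
--     stripped = line.strip()
--     if not stripped:
--         return True
--     return stripped.startswith("//") or stripped.startswith("#") or stripped.startswith("/*") or stripped.startswith("*")
--
-- def _is_top_level_close(line: str) -> bool:
--     stripped = line.strip()
--     return stripped == "}" or stripped == "};" or stripped.startswith("}")
--
-- def _find_first_balanced_point(lines: list[str], start_idx: int, target_end_idx: int) -> int | None:
--     for end_idx in range(start_idx, target_end_idx + 1):
--         text = "\n".join(lines[start_idx : end_idx + 1])
--         if compute_bracket_balance(text) == 0 and _is_top_level_close(lines[end_idx]):
--             if end_idx + 1 > target_end_idx or _is_comment_or_blank(lines[end_idx + 1]):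
--                 return end_idx
--     return None
--
-- def find_balanced_end_line(
--     lines: list[str], start_idx: int, target_end_idx: int, max_extension: int = _GENERIC_MAX_EXTENSION
-- ) -> int:
--     if target_end_idx >= len(lines):
--         target_end_idx = len(lines) - 1
--
--     text_to_target = "\n".join(lines[start_idx : target_end_idx + 1])
--     if compute_bracket_balance(text_to_target) == 0:
--         first_balanced = _find_first_balanced_point(lines, start_idx, target_end_idx)
--         if first_balanced is not None and first_balanced < target_end_idx:
--             return first_balanced
--         return target_end_idx
--
--     max_end = min(len(lines) - 1, target_end_idx + max_extension)
--
--     for end_idx in range(target_end_idx + 1, max_end + 1):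
--         text = "\n".join(lines[start_idx : end_idx + 1])
--         if compute_bracket_balance(text) == 0:
--             return end_idx
--
--     for end_idx in range(target_end_idx - 1, start_idx - 1, -1):
--         text = "\n".join(lines[start_idx : end_idx + 1])
--         if compute_bracket_balance(text) == 0:
--             return end_idx
--
--     return target_end_idx
-- ===== SOURCE B (Python) =====
-- _GENERIC_MAX_EXTENSION = 100
--
-- _PAIRS = {"{": "}", "[": "]", "(": ")"}
--
--
-- def _closes_block(lines, e, target_end_idx):
--     # line e closes a block at top level and the next in-range line is comment/blank
--     if not lines[e].strip().startswith("}"):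
--         return False
--     if e + 1 > target_end_idx:
--         return True
--     nxt = lines[e + 1].strip()
--     return not nxt or nxt.startswith(("//", "#", "/*", "*"))
--
--
-- def find_balanced_end_line(lines, start_idx, target_end_idx, max_extension=_GENERIC_MAX_EXTENSION):
--     n = len(lines)
--     if target_end_idx >= n:
--         target_end_idx = n - 1
--     max_end = min(n - 1, target_end_idx + max_extension)
--     top = max(target_end_idx, max_end)
--
--     # ONE incremental scan: bal[k] is the bracket balance of
--     # "\n".join(lines[start_idx : start_idx + k + 1]).  The scanner state is a
--     # stack of OPENING brackets plus the current string delimiter (or None) and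
--     # the parity of trailing backslashes, carried across lines instead of
--     # re-scanning the joined prefix for every candidate end line.
--     bal = []
--     opens = []
--     quote = None
--     esc_odd = False
--     for i in range(start_idx, top + 1):
--         for ch in (lines[i] if i == start_idx else "\n" + lines[i]):
--             if quote is not None:
--                 if ch == "\\":
--                     esc_odd = not esc_odd
--                 else:
--                     if ch == quote and not esc_odd:
--                         quote = None
--                     esc_odd = False
--             elif ch in "\"'`":
--                 quote = ch
--                 esc_odd = False
--             elif ch in _PAIRS:
--                 opens.append(ch)
--             elif opens and _PAIRS[opens[-1]] == ch:
--                 opens.pop()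
--         bal.append(len(opens))
--
--     k0 = target_end_idx - start_idx
--
--     if start_idx > target_end_idx:
--         return target_end_idx
--
--     if bal[k0] == 0:
--         cand = next((start_idx + k for k, b in enumerate(bal[: k0 + 1])
--                      if b == 0 and _closes_block(lines, start_idx + k, target_end_idx)), None)
--         return cand if cand is not None else target_end_idx
--
--     up = next((k for k in range(k0 + 1, len(bal)) if bal[k] == 0), None)
--     if up is not None:
--         return start_idx + up
--     down = next((k for k in range(k0 - 1, -1, -1) if bal[k] == 0), None)
--     if down is not None:
--         return start_idx + down
--     return target_end_idx
-- ===== Notes on version B (the rewrite author's own statement) =====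
-- stated objective: alternative
-- what changed: A re-joins and re-scans the whole prefix lines[start_idx:e+1] for every candidate end line; B makes one incremental scan that carries a different scanner state (a stack of opening brackets plus a string-mode/escape-parity flag) across lines, records the balance after each line in a table, and replaces A's three rescanning loops by next()/enumerate searches over that table.
-- outside the precondition, e.g. on find_balanced_end_line(["'[", '(}[`', '})`', '#', "([['"], -1, 4, 2): A returns 3, B returns 4; on find_balanced_end_line([], -7, -8, 2): A returns -8, B raises IndexError
import Mathlib
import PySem

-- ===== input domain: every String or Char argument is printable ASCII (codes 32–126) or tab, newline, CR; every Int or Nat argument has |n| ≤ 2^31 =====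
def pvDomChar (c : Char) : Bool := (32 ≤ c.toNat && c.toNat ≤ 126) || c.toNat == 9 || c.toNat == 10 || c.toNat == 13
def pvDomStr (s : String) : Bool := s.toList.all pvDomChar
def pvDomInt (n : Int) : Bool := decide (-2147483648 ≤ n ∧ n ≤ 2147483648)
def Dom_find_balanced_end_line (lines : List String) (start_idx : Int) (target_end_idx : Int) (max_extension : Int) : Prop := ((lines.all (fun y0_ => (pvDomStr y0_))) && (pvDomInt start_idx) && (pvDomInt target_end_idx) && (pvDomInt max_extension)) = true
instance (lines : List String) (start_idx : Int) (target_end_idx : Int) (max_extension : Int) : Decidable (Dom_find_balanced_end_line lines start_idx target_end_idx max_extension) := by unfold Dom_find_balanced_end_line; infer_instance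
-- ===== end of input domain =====

-- B replaces A's re-scan of the whole joined prefix for every candidate end line by ONE incremental
-- scan (stack of opening brackets + string mode carried across lines) that records a per-line
-- balance table, which three linear searches then consult (objective: alternative).

-- ===== PORT A =====
-- scanner state: (stack, in_string, string_char, escape_count); Python's string_char = "" is
-- modelled by the (never consulted) placeholder ' ' — it is only read while in_string is true.
def pvBracketPairs : PySem.Dict Char Char := PySem.Dict.ofList [('{', '}'), ('[', ']'), ('(', ')')]
def pvCloseBrackets : PySem.Set Char := PySem.Set.ofList (PySem.Dict.values pvBracketPairs)

def process_char_in_string (c : Char) (string_char : Char) (escape_count : Int) : Bool × Int :=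
  if c = '\\' then (true, escape_count + 1)
  else if c = string_char ∧ PySem.Int.mod escape_count 2 = 0 then (false, 0)
  else (true, 0)

-- Python mutates `stack`; the port returns the updated stack as an extra component.
def process_char_outside_string (c : Char) (stack : List Char) : (Bool × Char) × List Char :=
  if c = '"' ∨ c = '\'' ∨ c = '`' then ((true, c), stack)
  else
    match PySem.Dict.get? pvBracketPairs c with
    | some cl => ((false, ' '), stack ++ [cl])
    | none =>
      if PySem.Set.contains pvCloseBrackets c ∧ stack ≠ [] ∧ stack.getLast? = some c then
        ((false, ' '), stack.dropLast)
      else ((false, ' '), stack)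

def pvScanStep (s : List Char × Bool × Char × Int) (c : Char) : List Char × Bool × Char × Int :=
  match s with
  | (stack, in_string, string_char, escape_count) =>
    if in_string then
      let (b, e) := process_char_in_string c string_char escape_count
      (stack, b, string_char, e)
    else
      let ((b, sc), stack') := process_char_outside_string c stack
      (stack', b, sc, 0)

def compute_bracket_balance (text : String) : Int :=
  ((text.toList.foldl pvScanStep ([], false, ' ', 0)).1.length : Int)

def is_comment_or_blank (line : String) : Bool :=
  let stripped := PySem.Str.strip line
  if PySem.Str.len stripped = 0 then true
  else PySem.Str.startswith stripped "//" || PySem.Str.startswith stripped "#" ||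
       PySem.Str.startswith stripped "/*" || PySem.Str.startswith stripped "*"

def is_top_level_close (line : String) : Bool :=
  let stripped := PySem.Str.strip line
  (stripped == "}") || (stripped == "};") || PySem.Str.startswith stripped "}"

def pvJoinSlice (lines : List String) (s e : Int) : String :=
  PySem.Str.join "\n" (PySem.List.slice lines (some s) (some (e + 1)))

-- 'for end_idx in range(start_idx, target_end_idx + 1)' ported as fuel recursion over the range
-- (the range list is never materialised); pyGet? = none is exactly where Python raises IndexError
def pvFFBPLoop (lines : List String) (start_idx target_end_idx : Int) : Int → Nat → Option Int
  | _, 0 => none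
  | e, fuel + 1 =>
    if compute_bracket_balance (pvJoinSlice lines start_idx e) = 0 then
      match PySem.List.pyGet? lines e with
      | none => none  -- Python raises IndexError here (outside Pre_)
      | some line =>
        if is_top_level_close line = true
           ∧ (e + 1 > target_end_idx ∨ is_comment_or_blank (PySem.List.pyGetD lines (e + 1) "") = true)
        then some e
        else pvFFBPLoop lines start_idx target_end_idx (e + 1) fuel
    else pvFFBPLoop lines start_idx target_end_idx (e + 1) fuel

def find_first_balanced_point (lines : List String) (start_idx target_end_idx : Int) : Option Int :=
  pvFFBPLoop lines start_idx target_end_idx start_idx ((target_end_idx + 1) - start_idx).toNat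

def pvFirstZeroUp (lines : List String) (start_idx : Int) : Int → Nat → Option Int
  | _, 0 => none
  | e, fuel + 1 =>
    if compute_bracket_balance (pvJoinSlice lines start_idx e) = 0 then some e
    else pvFirstZeroUp lines start_idx (e + 1) fuel

def pvFirstZeroDown (lines : List String) (start_idx : Int) : Int → Nat → Option Int
  | _, 0 => none
  | e, fuel + 1 =>
    if compute_bracket_balance (pvJoinSlice lines start_idx e) = 0 then some e
    else pvFirstZeroDown lines start_idx (e - 1) fuel

def find_balanced_end_line (lines : List String) (start_idx : Int) (target_end_idx : Int) (max_extension : Int) : Int :=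
  let n := PySem.List.len lines
  let target := if target_end_idx ≥ n then n - 1 else target_end_idx
  if compute_bracket_balance (pvJoinSlice lines start_idx target) = 0 then
    match find_first_balanced_point lines start_idx target with
    | some fb => if fb < target then fb else target
    | none => target
  else
    let max_end := min (n - 1) (target + max_extension)
    match pvFirstZeroUp lines start_idx (target + 1) ((max_end + 1) - (target + 1)).toNat with
    | some e => e
    | none =>
      match pvFirstZeroDown lines start_idx (target - 1) ((target - 1) - (start_idx - 1)).toNat with
      | some e => e
      | none => target

-- ===== PORT B =====
-- Source B's scanner mode: outside any string, or inside a string with its delimiter and the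
-- parity of the trailing backslash run
inductive PvMode
  | code : PvMode
  | instr : Char → Bool → PvMode
deriving DecidableEq

def pvAltPairs : PySem.Dict Char Char := PySem.Dict.ofList [('{', '}'), ('[', ']'), ('(', ')')]

-- Source B's inline scanner step: the stack holds the OPENING brackets themselves
def pvAltStep (st : List Char × PvMode) (ch : Char) : List Char × PvMode :=
  match st.2 with
  | PvMode.instr q odd =>
    if ch = '\\' then (st.1, PvMode.instr q (!odd))
    else if ch = q ∧ odd = false then (st.1, PvMode.code)
    else (st.1, PvMode.instr q false)
  | PvMode.code =>
    if ch = '"' ∨ ch = '\'' ∨ ch = '`' then (st.1, PvMode.instr ch false)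
    else
      match PySem.Dict.get? pvAltPairs ch with
      | some _ => (st.1 ++ [ch], PvMode.code)
      | none =>
        match st.1.getLast? with
        | some o =>
          -- _PAIRS[opens[-1]]: exact because the stack only ever holds keys of _PAIRS
          if (PySem.Dict.get? pvAltPairs o).getD ' ' = ch then (st.1.dropLast, PvMode.code)
          else (st.1, PvMode.code)
        | none => (st.1, PvMode.code)

-- the ONE incremental pass over range(start_idx, top + 1): after line i it appends the current
-- stack depth to bal; lines[i] ported as pyGetD (exact: every i this range reaches is in range)
def pvAltScan (lines : List String) (start_idx top : Int) : List Int × (List Char × PvMode) :=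
  (PySem.List.pyRange start_idx (top + 1) 1).foldl
    (fun acc i =>
      let chs := (if i = start_idx then [] else ['\n']) ++ (PySem.List.pyGetD lines i "").toList
      let st := chs.foldl pvAltStep acc.2
      (acc.1 ++ [(st.1.length : Int)], st))
    ([], ([], PvMode.code))

-- Source B's _closes_block (lines[e] / lines[e+1] as pyGetD: exact, both indices are in range
-- whenever this is called — e ≤ target_end_idx < len lines)
def closes_block (lines : List String) (e target_end_idx : Int) : Bool :=
  if !(PySem.Str.startswith (PySem.Str.strip (PySem.List.pyGetD lines e "")) "}") then false
  else if e + 1 > target_end_idx then true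
  else
    let nxt := PySem.Str.strip (PySem.List.pyGetD lines (e + 1) "")
    (PySem.Str.len nxt == 0) || PySem.Str.startswith nxt "//" || PySem.Str.startswith nxt "#" ||
      PySem.Str.startswith nxt "/*" || PySem.Str.startswith nxt "*"

-- Source B's three next(...) searches ported as List.find? over the materialised index ranges
def find_balanced_end_line_alt (lines : List String) (start_idx : Int) (target_end_idx : Int) (max_extension : Int) : Int :=
  let n := PySem.List.len lines
  let target := if target_end_idx ≥ n then n - 1 else target_end_idx
  let max_end := min (n - 1) (target + max_extension)
  let top := max target max_end
  let bal := (pvAltScan lines start_idx top).1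
  let k0 := target - start_idx
  if start_idx > target then target
  else if PySem.List.pyGetD bal k0 0 = 0 then  -- bal[k0]: exact, 0 ≤ k0 < len bal here
    match (PySem.List.enumerate (PySem.List.slice bal none (some (k0 + 1)))).find?
        (fun p => p.2 == 0 && closes_block lines (start_idx + p.1) target) with
    | some p => start_idx + p.1
    | none => target
  else
    match (PySem.List.pyRange (k0 + 1) (PySem.List.len bal) 1).find?
        (fun k => PySem.List.pyGetD bal k 0 == 0) with  -- bal[k]: exact, k in range
    | some k => start_idx + k
    | none =>
      match (PySem.List.pyRange (k0 - 1) (-1) (-1)).find?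
          (fun k => PySem.List.pyGetD bal k 0 == 0) with  -- bal[k]: exact, k in range
      | some k => start_idx + k
      | none => target

-- ===== PRECONDITION & SPEC =====
-- Pre_ restricts to the function's natural domain: line indices that are actual (non-negative)
-- positions. For negative start_idx/target_end_idx A's value comes from Python's negative-index
-- and slice wraparound (and B may even raise there), which is outside the function's intent.
def Pre_find_balanced_end_line (lines : List String) (start_idx : Int) (target_end_idx : Int) (max_extension : Int) : Prop :=
  0 ≤ start_idx ∧ 0 ≤ target_end_idx
instance (lines : List String) (start_idx : Int) (target_end_idx : Int) (max_extension : Int) : Decidable (Pre_find_balanced_end_line lines start_idx target_end_idx max_extension) := by unfold Pre_find_balanced_end_line; infer_instance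

def pvWitness_find_balanced_end_line : List String × Int × Int × Int :=
  (["def f():", "  return {", "    'a': 1", "  }", ""], 0, 1, 100)

def Spec_find_balanced_end_line (lines : List String) (start_idx : Int) (target_end_idx : Int) (max_extension : Int) (out : Int) : Prop := out = find_balanced_end_line_alt lines start_idx target_end_idx max_extension
instance (lines : List String) (start_idx : Int) (target_end_idx : Int) (max_extension : Int) (out : Int) : Decidable (Spec_find_balanced_end_line lines start_idx target_end_idx max_extension out) := by unfold Spec_find_balanced_end_line; infer_instance

-- ===== CLAIM (what is proved, stated in full; the proofs are below) =====
def Claim_equal_find_balanced_end_line : Prop := ∀ (lines : List String) (start_idx : Int) (target_end_idx : Int) (max_extension : Int), Dom_find_balanced_end_line lines start_idx target_end_idx max_extension → Pre_find_balanced_end_line lines start_idx target_end_idx max_extension → Spec_find_balanced_end_line lines start_idx target_end_idx max_extension (find_balanced_end_line lines start_idx target_end_idx max_extension)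

-- ===== LEMMAS AND PROOFS =====

theorem pvItems_eq : pvBracketPairs.items = [('{', '}'), ('[', ']'), ('(', ')')] := by decide
theorem pvClosers_eq : pvCloseBrackets = ['}', ']', ')'] := by decide
theorem pvAltPairs_eq : pvAltPairs = pvBracketPairs := rfl
def pvPC (c : Char) : Char :=
  if c = '{' then '}' else if c = '[' then ']' else if c = '(' then ')' else ' '

theorem pvGet_eq (c : Char) : PySem.Dict.get? pvBracketPairs c =
    if c = '{' then some '}' else if c = '[' then some ']' else if c = '(' then some ')' else none := by
  by_cases h1 : c = '{' <;> by_cases h2 : c = '[' <;> by_cases h3 : c = '(' <;>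
    (try subst h1) <;> (try subst h2) <;> (try subst h3) <;>
    simp only [PySem.Dict.get?, pvItems_eq, List.find?] <;>
    first
    | decide
    | (have e1 : ('{' == c) = false := by simp [Ne.symm h1]
       have e2 : ('[' == c) = false := by simp [Ne.symm h2]
       have e3 : ('(' == c) = false := by simp [Ne.symm h3]
       simp [e1, e2, e3, h1, h2, h3])

theorem pvContains_eq (c : Char) :
    PySem.Set.contains pvCloseBrackets c = (c == '}' || c == ']' || c == ')') := by
  rw [pvClosers_eq]
  by_cases h1 : c = '}' <;> by_cases h2 : c = ']' <;> by_cases h3 : c = ')' <;>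
    simp_all [PySem.Set.contains]

def pvIsKey (c : Char) : Prop := c = '{' ∨ c = '[' ∨ c = '('

def pvRel (sa : List Char × Bool × Char × Int) (sb : List Char × PvMode) : Prop :=
  sa.1 = sb.1.map pvPC ∧ (∀ c ∈ sb.1, pvIsKey c) ∧
  (match sb.2 with
   | PvMode.code => sa.2.1 = false
   | PvMode.instr q odd =>
       sa.2.1 = true ∧ sa.2.2.1 = q ∧ PySem.Int.mod sa.2.2.2 2 = (if odd then 1 else 0))

theorem pvMod2_succ (e : Int) :
    PySem.Int.mod (e + 1) 2 = (if PySem.Int.mod e 2 = 0 then 1 else 0) := by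
  rw [PySem.Int.mod_eq_emod_of_pos (by norm_num : (0:Int) < 2),
      PySem.Int.mod_eq_emod_of_pos (by norm_num : (0:Int) < 2)]
  split_ifs with h <;> omega

theorem pvScanStep_in (st : List Char) (sc : Char) (e : Int) (c : Char) :
    pvScanStep (st, true, sc, e) c =
      (st, (process_char_in_string c sc e).1, sc, (process_char_in_string c sc e).2) := rfl

theorem pvScanStep_out (st : List Char) (sc : Char) (e : Int) (c : Char) :
    pvScanStep (st, false, sc, e) c =
      ((process_char_outside_string c st).2, (process_char_outside_string c st).1.1,
        (process_char_outside_string c st).1.2, 0) := rfl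

theorem pvRel_step (sa : List Char × Bool × Char × Int) (sb : List Char × PvMode) (c : Char)
    (h : pvRel sa sb) : pvRel (pvScanStep sa c) (pvAltStep sb c) := by
  obtain ⟨sta, ina, sca, eca⟩ := sa
  obtain ⟨stb, mb⟩ := sb
  obtain ⟨h1, h2, h3⟩ := h
  simp only at h1 h3
  subst h1
  cases mb with
  | instr q odd =>
    obtain ⟨hin, hsc, hesc⟩ := h3
    subst hin
    subst hsc
    have hm1 := pvMod2_succ eca
    rw [pvScanStep_in]
    simp only [pvAltStep, process_char_in_string]
    by_cases hbs : c = '\\' <;> by_cases hq : c = sca <;> cases odd <;>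
      simp_all [pvRel]
  | code =>
    simp only at h3
    subst h3
    rw [pvScanStep_out]
    by_cases hqt : c = '"' ∨ c = '\'' ∨ c = '`'
    · have hA : process_char_outside_string c (stb.map pvPC) = ((true, c), stb.map pvPC) := by
        simp only [process_char_outside_string, if_pos hqt]
      have hB : pvAltStep (stb, PvMode.code) c = (stb, PvMode.instr c false) := by
        simp only [pvAltStep, if_pos hqt]
      rw [hA, hB]
      refine ⟨rfl, h2, rfl, rfl, ?_⟩
      show PySem.Int.mod 0 2 = if false then 1 else 0
      decide
    · by_cases hk : pvIsKey c
      · have hsome : PySem.Dict.get? pvBracketPairs c = some (pvPC c) := by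
          rw [pvGet_eq c]
          rcases hk with h | h | h <;> subst h <;> rfl
        have hA : process_char_outside_string c (stb.map pvPC) =
            ((false, ' '), stb.map pvPC ++ [pvPC c]) := by
          simp only [process_char_outside_string, if_neg hqt, hsome]
        have hB : pvAltStep (stb, PvMode.code) c = (stb ++ [c], PvMode.code) := by
          simp only [pvAltStep, if_neg hqt, pvAltPairs_eq, hsome]
        rw [hA, hB]
        refine ⟨by simp, ?_, rfl⟩
        intro x hx
        rcases List.mem_append.mp hx with hx | hx
        · exact h2 x hx
        · simp at hx; subst hx; exact hk
      · have hnone : PySem.Dict.get? pvBracketPairs c = none := by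
          rw [pvGet_eq c]
          simp only [pvIsKey, not_or] at hk
          simp [hk.1, hk.2.1, hk.2.2]
        cases hlast : stb.getLast? with
        | none =>
          have hnil : stb = [] := List.getLast?_eq_none_iff.mp hlast
          subst hnil
          have hA : process_char_outside_string c ([] : List Char) = ((false, ' '), []) := by
            simp only [process_char_outside_string, if_neg hqt, hnone]
            rw [if_neg (by simp)]
          have hB : pvAltStep (([] : List Char), PvMode.code) c = ([], PvMode.code) := by
            simp only [pvAltStep, if_neg hqt, pvAltPairs_eq, hnone, List.getLast?_nil]
          simp only [List.map_nil]
          rw [hA, hB]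
          exact ⟨rfl, h2, rfl⟩
        | some o =>
          have hko : pvIsKey o := h2 o (List.mem_of_getLast? hlast)
          have hgeto : (PySem.Dict.get? pvBracketPairs o).getD ' ' = pvPC o := by
            rw [pvGet_eq o]
            rcases hko with h | h | h <;> subst h <;> rfl
          have hlastA : (stb.map pvPC).getLast? = some (pvPC o) := by
            rw [List.getLast?_map, hlast]; rfl
          have hclo : PySem.Set.contains pvCloseBrackets (pvPC o) = true := by
            rw [pvContains_eq]
            rcases hko with h | h | h <;> subst h <;> decide
          have hB : pvAltStep (stb, PvMode.code) c =
              (if pvPC o = c then (stb.dropLast, PvMode.code) else (stb, PvMode.code)) := by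
            simp only [pvAltStep, if_neg hqt, pvAltPairs_eq, hnone, hlast, hgeto]
          by_cases hpc : pvPC o = c
          · have hA : process_char_outside_string c (stb.map pvPC) =
                ((false, ' '), (stb.map pvPC).dropLast) := by
              simp only [process_char_outside_string, if_neg hqt, hnone]
              rw [if_pos ⟨hpc ▸ hclo, by
                  intro hnil
                  rw [List.map_eq_nil_iff.mp hnil] at hlast
                  simp at hlast, hpc ▸ hlastA⟩]
            rw [hA, hB, if_pos hpc]
            refine ⟨List.map_dropLast.symm, ?_, rfl⟩
            exact fun x hx => h2 x (List.dropLast_subset _ hx)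
          · have hA : process_char_outside_string c (stb.map pvPC) =
                ((false, ' '), stb.map pvPC) := by
              simp only [process_char_outside_string, if_neg hqt, hnone]
              rw [if_neg (by
                rintro ⟨_, _, hl⟩
                rw [hlastA] at hl
                exact hpc (by injection hl))]
            rw [hA, hB, if_neg hpc]
            exact ⟨rfl, h2, rfl⟩

theorem pvRel_foldl (cs : List Char) : ∀ sa sb, pvRel sa sb →
    pvRel (cs.foldl pvScanStep sa) (cs.foldl pvAltStep sb) := by
  induction cs with
  | nil => intro sa sb h; exact h
  | cons c rest ih => intro sa sb h; exact ih _ _ (pvRel_step sa sb c h)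

-- joining one more line appends '\n' + that line to the joined text
theorem pvJoin_snoc (sep : List Char) (xs : List (List Char)) (x : List Char) :
    PySem.Chars.join sep (xs ++ [x]) = if xs = [] then x else PySem.Chars.join sep xs ++ sep ++ x := by
  induction xs with
  | nil => simp [PySem.Chars.join_singleton]
  | cons a rest ih =>
    cases rest with
    | nil => simp [PySem.Chars.join_cons_cons, PySem.Chars.join_singleton]
    | cons b r =>
      have hne : (b :: r : List (List Char)) ≠ [] := by simp
      simp only [List.cons_append] at ih ⊢
      simp only [hne, if_false] at ih
      rw [PySem.Chars.join_cons_cons, ih, PySem.Chars.join_cons_cons]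
      simp [List.append_assoc]

theorem pvSlice_snoc {α : Type} (xs : List α) (s e : Int) (h0 : 0 ≤ s) (hs : s ≤ e)
    (hn : e < (xs.length : Int)) :
    PySem.List.slice xs (some s) (some (e + 1)) =
      PySem.List.slice xs (some s) (some e) ++ [xs[e.toNat]'(by omega)] := by
  rw [PySem.List.slice_toNat xs h0 (by omega), PySem.List.slice_toNat xs h0 (by omega)]
  have h1 : (e + 1).toNat - s.toNat = (e.toNat - s.toNat) + 1 := by omega
  rw [h1, List.take_add_one]
  have h2 : (xs.drop s.toNat)[e.toNat - s.toNat]? = some (xs[e.toNat]'(by omega)) := by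
    rw [List.getElem?_drop]
    have h3 : s.toNat + (e.toNat - s.toNat) = e.toNat := by omega
    rw [h3, List.getElem?_eq_getElem (by omega)]
  simp [h2]

theorem pvJoinSlice_self (lines : List String) (s : Int) (h0 : 0 ≤ s) (hn : s < (lines.length : Int)) :
    (pvJoinSlice lines s s).toList = (PySem.List.pyGetD lines s "").toList := by
  have hslice : PySem.List.slice lines (some s) (some (s + 1)) = [lines[s.toNat]'(by omega)] := by
    rw [PySem.List.slice_toNat lines h0 (by omega)]
    have h1 : (s + 1).toNat - s.toNat = 1 := by omega
    rw [h1]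
    have h2 : s.toNat < lines.length := by omega
    simp [List.take_one]
  rw [pvJoinSlice, hslice, PySem.Str.toList_join]
  simp [PySem.Chars.join_singleton, PySem.List.pyGetD_eq_getElem lines "" h0 hn]

theorem pvJoinSlice_step (lines : List String) (s e : Int) (h0 : 0 ≤ s) (hs : s ≤ e)
    (hn : e + 1 < (lines.length : Int)) :
    (pvJoinSlice lines s (e + 1)).toList =
      (pvJoinSlice lines s e).toList ++ '\n' :: (PySem.List.pyGetD lines (e + 1) "").toList := by
  have hsnoc := pvSlice_snoc lines s (e + 1) h0 (by omega) hn
  have hne : PySem.List.slice lines (some s) (some (e + 1)) ≠ [] := by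
    rw [PySem.List.slice_toNat lines h0 (by omega)]
    have h1 : (e + 1).toNat - s.toNat = (e.toNat - s.toNat) + 1 := by omega
    rw [h1]
    have h2 : s.toNat < lines.length := by omega
    simp [List.take_eq_nil_iff, List.drop_eq_nil_iff]
    omega
  rw [pvJoinSlice, hsnoc, PySem.Str.toList_join, List.map_append]
  simp only [List.map_cons, List.map_nil]
  rw [pvJoin_snoc]
  have hxs : (PySem.List.slice lines (some s) (some (e + 1))).map String.toList ≠ [] := by
    simpa using hne
  rw [if_neg hxs]
  have hget : (PySem.List.pyGetD lines (e + 1) "").toList = (lines[(e+1).toNat]'(by omega)).toList := by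
    rw [PySem.List.pyGetD_eq_getElem lines "" (by omega) hn]
  rw [pvJoinSlice, PySem.Str.toList_join]
  simp [hget]

-- A's scanner state after the joined prefix lines[s:e+1]
def pvAState (lines : List String) (s e : Int) : List Char × Bool × Char × Int :=
  (pvJoinSlice lines s e).toList.foldl pvScanStep ([], false, ' ', 0)

def pvBalA (lines : List String) (s : Int) (e : Int) : Int := ((pvAState lines s e).1.length : Int)

theorem pvRel_length (sa : List Char × Bool × Char × Int) (sb : List Char × PvMode)
    (h : pvRel sa sb) : (sa.1.length : Int) = (sb.1.length : Int) := by
  rw [h.1, List.length_map]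

-- peel the last line off the incremental pass
theorem pvAltScan_step (lines : List String) (s e : Int) (h : s ≤ e) :
    pvAltScan lines s e =
      ((pvAltScan lines s (e-1)).1 ++
         [(((((if e = s then [] else ['\n']) ++ (PySem.List.pyGetD lines e "").toList).foldl
              pvAltStep (pvAltScan lines s (e-1)).2)).1.length : Int)],
       ((if e = s then [] else ['\n']) ++ (PySem.List.pyGetD lines e "").toList).foldl
         pvAltStep (pvAltScan lines s (e-1)).2) := by
  conv_lhs => rw [pvAltScan]
  rw [PySem.List.pyRange_one_succ_right h, List.foldl_append]
  rw [pvAltScan, show e - 1 + 1 = e by ring]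
  rfl

-- the incremental pass computes exactly the per-prefix balances, and its state tracks A's
theorem pvAltScan_spec (lines : List String) (s : Int) (h0 : 0 ≤ s) (t : Int)
    (ht : t < (lines.length : Int)) :
    ∀ (m : Nat) (e : Int), e = s - 1 + m → e ≤ t →
      ((pvAltScan lines s e).1 = (PySem.List.pyRange s (e + 1) 1).map (pvBalA lines s)
        ∧ (s ≤ e → pvRel (pvAState lines s e) (pvAltScan lines s e).2)) := by
  intro m
  induction m with
  | zero =>
    intro e he _
    have hnil : PySem.List.pyRange s (e + 1) 1 = [] := PySem.List.pyRange_one_eq_nil (by omega)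
    refine ⟨?_, fun hse => absurd hse (by omega)⟩
    rw [pvAltScan, hnil]
    simp
  | succ m ih =>
    intro e he het
    have he0 : e - 1 = s - 1 + (m : Int) := by push_cast at he ⊢; omega
    have hse : s ≤ e := by push_cast at he; omega
    obtain ⟨ih1, ih2⟩ := ih (e - 1) he0 (by omega)
    rw [pvAltScan_step lines s e hse]
    rw [show e - 1 + 1 = e by ring] at ih1
    by_cases hes : e = s
    · rw [hes]
      have hprev : pvAltScan lines s (s - 1) = ([], ([], PvMode.code)) := by
        rw [pvAltScan, show s - 1 + 1 = s by ring, PySem.List.pyRange_one_eq_nil (le_refl s)]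
        rfl
      have hA : pvAState lines s s =
          (PySem.List.pyGetD lines s "").toList.foldl pvScanStep ([], false, ' ', 0) := by
        rw [pvAState, pvJoinSlice_self lines s h0 (by omega)]
      have hrel : pvRel (pvAState lines s s)
          ((([] : List Char) ++ (PySem.List.pyGetD lines s "").toList).foldl pvAltStep
            ([], PvMode.code)) := by
        rw [hA, List.nil_append]
        exact pvRel_foldl _ _ _ ⟨rfl, by simp, rfl⟩
      rw [hprev, if_pos rfl]
      refine ⟨?_, fun _ => hrel⟩
      rw [PySem.List.pyRange_one_succ_right (le_refl s), PySem.List.pyRange_one_eq_nil (le_refl s)]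
      simp only [List.nil_append, List.map_cons, List.map_nil, pvBalA]
      rw [pvRel_length _ _ hrel]
      simp
    · have hse1 : s ≤ e - 1 := by omega
      have hjoin := pvJoinSlice_step lines s (e - 1) h0 hse1
        (by omega : e - 1 + 1 < (lines.length : Int))
      rw [show e - 1 + 1 = e by ring] at hjoin
      have hAstep : pvAState lines s e =
          ('\n' :: (PySem.List.pyGetD lines e "").toList).foldl pvScanStep
            (pvAState lines s (e - 1)) := by
        rw [pvAState, hjoin, List.foldl_append]
        rfl
      have hrel : pvRel (pvAState lines s e)
          (((if e = s then [] else ['\n']) ++ (PySem.List.pyGetD lines e "").toList).foldl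
            pvAltStep (pvAltScan lines s (e - 1)).2) := by
        rw [hAstep]
        simp only [if_neg hes, List.cons_append, List.nil_append]
        exact pvRel_foldl _ _ _ (ih2 hse1)
      refine ⟨?_, fun _ => hrel⟩
      rw [PySem.List.pyRange_one_succ_right (by omega : s ≤ e), List.map_append, ih1]
      simp only [List.map_cons, List.map_nil, pvBalA]
      rw [pvRel_length _ _ hrel]

theorem pvBal_eq_map (lines : List String) (s top : Int) (h0 : 0 ≤ s) (hst : s ≤ top + 1)
    (htop : top < (lines.length : Int)) :
    (pvAltScan lines s top).1 = (PySem.List.pyRange s (top + 1) 1).map (pvBalA lines s) :=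
  (pvAltScan_spec lines s h0 top htop (top - (s - 1)).toNat top (by omega) (le_refl top)).1

theorem pvBal_length (lines : List String) (s top : Int) (h0 : 0 ≤ s) (hst : s ≤ top + 1)
    (htop : top < (lines.length : Int)) :
    ((pvAltScan lines s top).1.length : Int) = (top + 1) - s := by
  rw [pvBal_eq_map lines s top h0 hst htop, List.length_map, PySem.List.length_pyRange_one]
  omega

theorem pvBalLookup (lines : List String) (s top e : Int) (h0 : 0 ≤ s) (hse : s ≤ e) (he : e ≤ top)
    (htop : top < (lines.length : Int)) :
    PySem.List.pyGetD (pvAltScan lines s top).1 (e - s) 0 =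
      compute_bracket_balance (pvJoinSlice lines s e) := by
  rw [pvBal_eq_map lines s top h0 (by omega) htop]
  have hk : e - s = (((e - s).toNat : Nat) : Int) := by omega
  rw [hk, PySem.List.pyGetD_map_pyRange_one (pvBalA lines s) s (top + 1) (e - s).toNat 0 (by omega)]
  have h2 : s + (((e - s).toNat : Nat) : Int) = e := by omega
  rw [h2]
  rfl

theorem pvTlc_eq (line : String) :
    is_top_level_close line = PySem.Str.startswith (PySem.Str.strip line) "}" := by
  simp only [is_top_level_close]
  by_cases h1 : PySem.Str.strip line = "}"
  · rw [h1]; decide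
  · by_cases h2 : PySem.Str.strip line = "};"
    · rw [h2]; decide
    · simp [h1, h2]

-- Source B's combined per-line test agrees with A's two helpers
theorem pvCloses_eq (lines : List String) (e target : Int) :
    closes_block lines e target =
      (is_top_level_close (PySem.List.pyGetD lines e "") &&
        (decide (e + 1 > target) || is_comment_or_blank (PySem.List.pyGetD lines (e + 1) ""))) := by
  simp only [closes_block, pvTlc_eq, is_comment_or_blank, PySem.Str.startswith,
    PySem.Str.toList_strip, PySem.Str.len_eq, Int.natCast_eq_zero, List.length_eq_zero_iff]
  split_ifs with h1 h2 h3 <;> simp_all [Bool.or_assoc]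
  rw [show ((((PySem.Chars.strip (PySem.List.pyGetD lines (e + 1) "").toList).length : Int) == 0) : Bool) = false by
        simp only [beq_eq_false_iff_ne, ne_eq, Int.natCast_eq_zero, List.length_eq_zero_iff]
        assumption,
      show (decide (target ≤ e)) = false by simp only [decide_eq_false_iff_not]; omega]

theorem pvLineGet (lines : List String) (e : Int) (h0 : 0 ≤ e) (he : e < (lines.length : Int)) :
    PySem.List.pyGet? lines e = some (PySem.List.pyGetD lines e "") := by
  rw [PySem.List.pyGet?_eq_some_getElem _ h0 he, PySem.List.pyGetD_eq_getElem _ "" h0 he]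

-- find? cons steps with the predicate given explicitly (for rewriting under beta)
theorem pvFind?_cons_pos {α : Type} (p : α → Bool) (a : α) (l : List α) (h : p a = true) :
    (a :: l).find? p = some a := List.find?_cons_of_pos h
theorem pvFind?_cons_neg {α : Type} (p : α → Bool) (a : α) (l : List α) (h : ¬ p a = true) :
    (a :: l).find? p = l.find? p := List.find?_cons_of_neg h

-- find? congruence on a list (pointwise equal predicates)
theorem pvFind?_congr {α : Type} (l : List α) (p q : α → Bool) (h : ∀ x ∈ l, p x = q x) :
    l.find? p = l.find? q := by
  induction l with
  | nil => rfl
  | cons a t ih =>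
    rw [List.find?_cons, List.find?_cons, h a (List.mem_cons_self)]
    cases q a <;> simp [ih (fun x hx => h x (List.mem_cons_of_mem a hx))]

-- A's first phase equals find? of Source B's phase-1 predicate over the shifted range
theorem pvPhase1_eq (lines : List String) (s top target : Int) (h0 : 0 ≤ s)
    (htop : top < (lines.length : Int)) (hta : target ≤ top) :
    ∀ (fuel : Nat) (e : Int), s ≤ e → e + (fuel : Int) ≤ target + 1 →
      pvFFBPLoop lines s target e fuel =
        ((PySem.List.pyRange (e - s) (e - s + fuel) 1).find?
          (fun k => (PySem.List.pyGetD (pvAltScan lines s top).1 k 0 == 0 &&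
            closes_block lines (s + k) target))).map (fun k => s + k) := by
  intro fuel
  induction fuel with
  | zero =>
    intro e _ _
    rw [show e - s + ((0:Nat):Int) = e - s by push_cast; ring,
        PySem.List.pyRange_one_eq_nil (le_refl _)]
    rfl
  | succ fuel ih =>
    intro e hse hbound
    have het : e ≤ target := by push_cast at hbound; omega
    have hbal := pvBalLookup lines s top e h0 hse (by omega) htop
    have hline := pvLineGet lines e (by omega) (by omega)
    have hval : ((fun k => (PySem.List.pyGetD (pvAltScan lines s top).1 k 0 == 0 &&
        closes_block lines (s + k) target)) (e - s) = true) ↔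
        (compute_bracket_balance (pvJoinSlice lines s e) = 0 ∧
          (is_top_level_close (PySem.List.pyGetD lines e "") = true ∧
            (e + 1 > target ∨ is_comment_or_blank (PySem.List.pyGetD lines (e + 1) "") = true))) := by
      simp only [hbal, pvCloses_eq, show s + (e - s) = e by ring, Bool.and_eq_true,
        Bool.or_eq_true, beq_iff_eq, decide_eq_true_eq]
    rw [PySem.List.pyRange_one_cons (by push_cast; omega : e - s < e - s + ((fuel+1:Nat):Int))]
    simp only [pvFFBPLoop, hline]
    by_cases hz : compute_bracket_balance (pvJoinSlice lines s e) = 0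
    · rw [if_pos hz]
      by_cases hc : is_top_level_close (PySem.List.pyGetD lines e "") = true
           ∧ (e + 1 > target ∨ is_comment_or_blank (PySem.List.pyGetD lines (e + 1) "") = true)
      · rw [if_pos hc, pvFind?_cons_pos (fun k => PySem.List.pyGetD (pvAltScan lines s top).1 k 0 == 0 && closes_block lines (s + k) target) _ _ (hval.mpr ⟨hz, hc⟩)]
        simp only [Option.map_some]
        rw [show s + (e - s) = e by ring]
      · rw [if_neg hc, pvFind?_cons_neg (fun k => PySem.List.pyGetD (pvAltScan lines s top).1 k 0 == 0 && closes_block lines (s + k) target) _ _ (fun hcontra => hc (hval.mp hcontra).2),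
            ih (e + 1) (by omega) (by push_cast at hbound ⊢; omega)]
        rw [show e + 1 - s = e - s + 1 by ring,
            show e - s + ((fuel + 1 : Nat) : Int) = e - s + 1 + (fuel : Int) by push_cast; ring]
    · rw [if_neg hz, pvFind?_cons_neg (fun k => PySem.List.pyGetD (pvAltScan lines s top).1 k 0 == 0 && closes_block lines (s + k) target) _ _ (fun hcontra => hz (hval.mp hcontra).1),
          ih (e + 1) (by omega) (by push_cast at hbound ⊢; omega)]
      rw [show e + 1 - s = e - s + 1 by ring,
          show e - s + ((fuel + 1 : Nat) : Int) = e - s + 1 + (fuel : Int) by push_cast; ring]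

-- A's upward search equals find? of 'bal[k] == 0' over the shifted range
theorem pvUp_eq (lines : List String) (s top : Int) (h0 : 0 ≤ s)
    (htop : top < (lines.length : Int)) :
    ∀ (fuel : Nat) (e : Int), s ≤ e → e + (fuel : Int) ≤ top + 1 →
      pvFirstZeroUp lines s e fuel =
        ((PySem.List.pyRange (e - s) (e - s + fuel) 1).find?
          (fun k => PySem.List.pyGetD (pvAltScan lines s top).1 k 0 == 0)).map (fun k => s + k) := by
  intro fuel
  induction fuel with
  | zero =>
    intro e _ _
    rw [show e - s + ((0:Nat):Int) = e - s by push_cast; ring,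
        PySem.List.pyRange_one_eq_nil (le_refl _)]
    rfl
  | succ fuel ih =>
    intro e hse hbound
    have he : e ≤ top := by push_cast at hbound; omega
    have hbal := pvBalLookup lines s top e h0 hse he htop
    have hval : ((fun k => PySem.List.pyGetD (pvAltScan lines s top).1 k 0 == 0) (e - s) = true) ↔
        compute_bracket_balance (pvJoinSlice lines s e) = 0 := by
      simp only [hbal, beq_iff_eq]
    rw [PySem.List.pyRange_one_cons (by push_cast; omega : e - s < e - s + ((fuel+1:Nat):Int))]
    simp only [pvFirstZeroUp]
    by_cases hz : compute_bracket_balance (pvJoinSlice lines s e) = 0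
    · rw [if_pos hz, pvFind?_cons_pos (fun k => PySem.List.pyGetD (pvAltScan lines s top).1 k 0 == 0) _ _ (hval.mpr hz)]
      simp only [Option.map_some]
      rw [show s + (e - s) = e by ring]
    · rw [if_neg hz, pvFind?_cons_neg (fun k => PySem.List.pyGetD (pvAltScan lines s top).1 k 0 == 0) _ _ (fun hcontra => hz (hval.mp hcontra)),
          ih (e + 1) (by omega) (by push_cast at hbound ⊢; omega)]
      rw [show e + 1 - s = e - s + 1 by ring,
          show e - s + ((fuel + 1 : Nat) : Int) = e - s + 1 + (fuel : Int) by push_cast; ring]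

-- A's downward search equals find? over Source B's countdown range
theorem pvDown_eq (lines : List String) (s top : Int) (h0 : 0 ≤ s)
    (htop : top < (lines.length : Int)) :
    ∀ (fuel : Nat) (e : Int), e ≤ top → s - 1 ≤ e - (fuel : Int) →
      pvFirstZeroDown lines s e fuel =
        ((PySem.List.pyRange (e - s) (e - s - fuel) (-1)).find?
          (fun k => PySem.List.pyGetD (pvAltScan lines s top).1 k 0 == 0)).map (fun k => s + k) := by
  intro fuel
  induction fuel with
  | zero =>
    intro e _ _
    rw [show e - s - ((0:Nat):Int) = e - s by push_cast; ring,
        PySem.List.pyRange_neg_one_eq_nil (le_refl _)]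
    rfl
  | succ fuel ih =>
    intro e he hbound
    have hse : s ≤ e := by push_cast at hbound; omega
    have hbal := pvBalLookup lines s top e h0 hse he htop
    have hval : ((fun k => PySem.List.pyGetD (pvAltScan lines s top).1 k 0 == 0) (e - s) = true) ↔
        compute_bracket_balance (pvJoinSlice lines s e) = 0 := by
      simp only [hbal, beq_iff_eq]
    rw [PySem.List.pyRange_neg_one_cons (by push_cast; omega : e - s - ((fuel+1:Nat):Int) < e - s)]
    simp only [pvFirstZeroDown]
    by_cases hz : compute_bracket_balance (pvJoinSlice lines s e) = 0
    · rw [if_pos hz, pvFind?_cons_pos (fun k => PySem.List.pyGetD (pvAltScan lines s top).1 k 0 == 0) _ _ (hval.mpr hz)]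
      simp only [Option.map_some]
      rw [show s + (e - s) = e by ring]
    · rw [if_neg hz, pvFind?_cons_neg (fun k => PySem.List.pyGetD (pvAltScan lines s top).1 k 0 == 0) _ _ (fun hcontra => hz (hval.mp hcontra)),
          ih (e - 1) (by omega) (by push_cast at hbound ⊢; omega)]
      rw [show e - 1 - s = e - s - 1 by ring,
          show e - s - ((fuel + 1 : Nat) : Int) = e - s - 1 - (fuel : Int) by push_cast; ring]

-- B's phase-1 enumerate over the sliced table is the find? over the index range
theorem pvEnum_slice (lines : List String) (s top k0 : Int) (h0 : 0 ≤ s) (hk0 : 0 ≤ k0)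
    (htop : top < (lines.length : Int)) (hk0top : s + k0 ≤ top) (target : Int) :
    (PySem.List.enumerate (PySem.List.slice (pvAltScan lines s top).1 none (some (k0 + 1)))).find?
        (fun p => p.2 == 0 && closes_block lines (s + p.1) target) =
      ((PySem.List.pyRange 0 (k0 + 1) 1).find?
        (fun k => (PySem.List.pyGetD (pvAltScan lines s top).1 k 0 == 0 &&
          closes_block lines (s + k) target))).map
        (fun k => (k, PySem.List.pyGetD (pvAltScan lines s top).1 k 0)) := by
  set bal := (pvAltScan lines s top).1 with hbal
  have hlen : (bal.length : Int) = (top + 1) - s := pvBal_length lines s top h0 (by omega) htop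
  have hslice : PySem.List.slice bal none (some (k0 + 1)) = bal.take (k0 + 1).toNat :=
    PySem.List.slice_to bal (by omega)
  have htake : (bal.take (k0 + 1).toNat).length = (k0 + 1).toNat := by
    rw [List.length_take]
    omega
  have hlen2 : ((bal.take (k0+1).toNat).length : Int) = k0 + 1 := by rw [htake]; omega
  have hgd : ∀ k ∈ PySem.List.pyRange 0 (k0 + 1) 1,
      PySem.List.pyGetD (bal.take (k0+1).toNat) k 0 = PySem.List.pyGetD bal k 0 := by
    intro k hk
    have hkb := (PySem.List.mem_pyRange_one).mp hk
    rw [PySem.List.pyGetD_eq_getElem _ 0 hkb.1 (by rw [hlen2]; omega),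
        PySem.List.pyGetD_eq_getElem _ 0 hkb.1 (by omega)]
    rw [List.getElem_take]
  rw [hslice, PySem.List.enumerate_eq_map_pyRange (d := 0), List.find?_map]
  rw [PySem.List.len_eq, hlen2]
  rw [pvFind?_congr _ _ _ (fun k hk => by
    simp only [Function.comp_apply]
    rw [hgd k hk])]
  cases hf : (PySem.List.pyRange 0 (k0 + 1) 1).find?
      (fun k => (PySem.List.pyGetD bal k 0 == 0 && closes_block lines (s + k) target)) with
  | none => rfl
  | some j =>
    simp only [Option.map_some]
    rw [hgd j (List.mem_of_find?_eq_some hf)]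

-- ===== VERDICT (by name: the statement is the Claim_ definition above) =====
theorem find_balanced_end_line_spec : Claim_equal_find_balanced_end_line := by
  intro lines s te me _ hpre
  obtain ⟨h0, hte⟩ := hpre
  show find_balanced_end_line lines s te me = find_balanced_end_line_alt lines s te me
  simp only [find_balanced_end_line, find_balanced_end_line_alt, PySem.List.len_eq]
  set L := (lines.length : Int) with hL
  set target := if te ≥ L then L - 1 else te with htargetdef
  have htle : target ≤ L - 1 := by rw [htargetdef]; split_ifs with h <;> omega
  have htge : -1 ≤ target := by rw [htargetdef]; split_ifs with h <;> omega
  set max_end := min (L - 1) (target + me) with hmedef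
  set top := max target max_end with htopdef
  have htople : top ≤ L - 1 := by omega
  have htopge : target ≤ top := le_max_left _ _
  by_cases hts : target < s
  · -- the slice up to target is empty: A reads balance 0 and searches an empty range;
    -- B returns target directly from its s > target guard
    have hempty : PySem.List.slice lines (some s) (some (target + 1)) = [] := by
      rw [PySem.List.slice_toNat lines h0 (by omega : (0:Int) ≤ target + 1)]
      have h1 : (target + 1).toNat - s.toNat = 0 := by omega
      rw [h1]
      simp
    have hbal0 : compute_bracket_balance (pvJoinSlice lines s target) = 0 := by
      simp [compute_bracket_balance, pvJoinSlice, hempty, PySem.Str.toList_join,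
        PySem.Chars.join_nil]
    have hf0 : ((target + 1) - s).toNat = 0 := by omega
    rw [if_pos hbal0, if_pos (by omega : s > target)]
    rw [find_first_balanced_point, hf0]
    rfl
  · have hsle : s ≤ target := not_lt.mp hts
    have ht0 : 0 ≤ target := by omega
    have htoplen : top < L := by omega
    rw [if_neg (by omega : ¬ s > target)]
    have hbalAt : PySem.List.pyGetD (pvAltScan lines s top).1 (target - s) 0 =
        compute_bracket_balance (pvJoinSlice lines s target) :=
      pvBalLookup lines s top target h0 hsle htopge htoplen
    rw [hbalAt]
    by_cases hz : compute_bracket_balance (pvJoinSlice lines s target) = 0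
    · rw [if_pos hz, if_pos hz]
      have hph := pvPhase1_eq lines s top target h0 htoplen htopge ((target + 1) - s).toNat s
        (le_refl s) (by omega)
      rw [show s - s = (0:Int) by ring,
          show (0:Int) + (((target + 1) - s).toNat : Int) = (target - s) + 1 by omega] at hph
      rw [find_first_balanced_point, hph]
      rw [pvEnum_slice lines s top (target - s) h0 (by omega) htoplen (by omega) target]
      cases hf : (PySem.List.pyRange 0 ((target - s) + 1) 1).find?
          (fun k => (PySem.List.pyGetD (pvAltScan lines s top).1 k 0 == 0 &&
            closes_block lines (s + k) target)) with
      | none => rfl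
      | some k =>
        have hkb := (PySem.List.mem_pyRange_one).mp (List.mem_of_find?_eq_some hf)
        simp only [Option.map_some]
        by_cases hlt : s + k < target
        · rw [if_pos hlt]
        · rw [if_neg hlt]
          omega
    · rw [if_neg hz, if_neg hz]
      have hlen : ((pvAltScan lines s top).1.length : Int) = (top + 1) - s :=
        pvBal_length lines s top h0 (by omega) htoplen
      have hup := pvUp_eq lines s top h0 htoplen ((max_end + 1) - (target + 1)).toNat
        (target + 1) (by omega) (by omega)
      have hdn := pvDown_eq lines s top h0 htoplen ((target - 1) - (s - 1)).toNat
        (target - 1) (by omega) (by omega)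
      rw [show target + 1 - s = (target - s) + 1 by ring,
          show (target - s) + 1 + ((((max_end + 1) - (target + 1)).toNat : Nat) : Int) =
            (top + 1) - s by omega] at hup
      rw [show target - 1 - s = (target - s) - 1 by ring,
          show (target - s) - 1 - ((((target - 1) - (s - 1)).toNat : Nat) : Int) = -1 by omega]
        at hdn
      rw [hup, hdn, hlen]
      cases hfu : (PySem.List.pyRange ((target - s) + 1) ((top + 1) - s) 1).find?
          (fun k => PySem.List.pyGetD (pvAltScan lines s top).1 k 0 == 0) with
      | none =>
        simp only [Option.map_none]
        cases hfd : (PySem.List.pyRange ((target - s) - 1) (-1) (-1)).find?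
            (fun k => PySem.List.pyGetD (pvAltScan lines s top).1 k 0 == 0) <;> rfl
      | some k => rfl
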